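-- pv_equiv track=rewrite | github.com/QuangPhung15/CompetitiveProgramming | codeforce/Python/800/ICPC Balloons.py | solve
-- ===== SOURCE A (Python) =====
-- def solve(n, s):
-- 	res = 0
-- 	seen = set()
--
-- 	for c in s:
-- 		if (c not in seen):
-- 			res += 1
--
-- 		seen.add(c)
-- 		res += 1
--
-- 	return res
-- ===== SOURCE B (Python) =====
-- def solve(n, s):
--     counts = {}
--     for c in s:
--         counts[c] = counts.get(c, 0) + 1
--     return sum(v + 1 for v in counts.values())
-- ===== Notes on version B (the rewrite author's own statement) =====
-- stated objective: alternative
-- what changed: Instead of a running total with a seen-set and membership test, B builds a character-frequency dictionary in one pass and then aggregates count+1 over its entries (each problem contributes its solve count plus one first-solve bonus).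
import Mathlib
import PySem

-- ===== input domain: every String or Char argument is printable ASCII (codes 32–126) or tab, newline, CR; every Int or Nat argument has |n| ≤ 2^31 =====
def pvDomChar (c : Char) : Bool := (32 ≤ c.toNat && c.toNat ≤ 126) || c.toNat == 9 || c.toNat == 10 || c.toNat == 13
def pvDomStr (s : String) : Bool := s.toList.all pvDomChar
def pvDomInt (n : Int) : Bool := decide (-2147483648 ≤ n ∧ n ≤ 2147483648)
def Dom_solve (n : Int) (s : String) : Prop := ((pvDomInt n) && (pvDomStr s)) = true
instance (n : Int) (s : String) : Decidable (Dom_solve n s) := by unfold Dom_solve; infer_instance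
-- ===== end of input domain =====

-- B replaces A's running total + seen-set by a frequency dictionary built in one pass,
-- then aggregates count+1 over its entries; objective: alternative.

-- ===== PORT A =====
-- the 'for c in s' loop: state (res, seen), body in source order
def solveLoop : List Char → Int → PySem.Set Char → Int
  | [], res, _ => res
  | c :: cs, res, seen =>
      let res := if PySem.Set.contains seen c then res else res + 1
      solveLoop cs (res + 1) (PySem.Set.add seen c)

def solve (n : Int) (s : String) : Int := solveLoop s.toList 0 PySem.Set.empty

-- ===== PORT B =====
-- counts[c] = counts.get(c, 0) + 1 loop, then sum(v + 1 for v in counts.values())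
def solve_alt (n : Int) (s : String) : Int :=
  let counts := s.toList.foldl (fun d c => d.insert c (d.getD c 0 + 1)) PySem.Dict.empty
  (counts.values.map (· + 1)).sum

-- ===== PRECONDITION & SPEC =====
def Spec_solve (n : Int) (s : String) (out : Int) : Prop := out = solve_alt n s
instance (n : Int) (s : String) (out : Int) : Decidable (Spec_solve n s out) := by unfold Spec_solve; infer_instance

-- ===== CLAIM (what is proved, stated in full; the proofs are below) =====
def Claim_equal_solve : Prop := ∀ (n : Int) (s : String), Dom_solve n s → Spec_solve n s (solve n s)

-- ===== LEMMAS AND PROOFS =====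
-- A's loop returns res + |cs| + (new distinct chars added to seen)
theorem solveLoop_eq (cs : List Char) (res : Int) (seen : PySem.Set Char) :
    solveLoop cs res seen
      = res + cs.length + (((PySem.Set.update seen cs).length : Int) - (seen.length : Int)) := by
  induction cs generalizing res seen with
  | nil => simp [solveLoop, PySem.Set.update]
  | cons c cs ih =>
      rw [show PySem.Set.update seen (c :: cs) = PySem.Set.update (PySem.Set.add seen c) cs from rfl]
      by_cases h : PySem.Set.contains seen c = true
      · simp only [solveLoop, h, if_pos, ih]
        have : PySem.Set.add seen c = seen := by
          simp [PySem.Set.add, by simpa [PySem.Set.contains] using h]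
        rw [this]
        push_cast [List.length_cons]
        ring
      · simp only [solveLoop, h, ih]
        have hlen : (PySem.Set.add seen c).length = seen.length + 1 := by
          have : ¬ c ∈ seen := fun hm => h (by simpa [PySem.Set.contains] using hm)
          simp [PySem.Set.add, this]
        rw [hlen]
        push_cast [List.length_cons]
        ring

-- cast of a Nat-valued sum
theorem intCast_sum_map {α : Type} (f : α → Nat) (l : List α) :
    (l.map (fun a => (f a : Int))).sum = ((l.map f).sum : Int) := by
  induction l with
  | nil => simp
  | cons a t ih => simp [ih]

-- sum of the multiplicities over the distinct characters = length of the list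
theorem sum_counts_ofList (l : List Char) :
    ((PySem.Set.ofList l).map (fun k => (l.count k : Int))).sum = (l.length : Int) := by
  have hperm : (PySem.Set.ofList l : List Char).Perm l.dedup := by
    refine (List.perm_ext_iff_of_nodup ?_ l.nodup_dedup).mpr ?_
    · exact PySem.Set.nodup_ofList l
    · intro a; simp [PySem.Set.mem_ofList, List.mem_dedup]
  calc ((PySem.Set.ofList l).map (fun k => (l.count k : Int))).sum
      = (l.dedup.map (fun k => (l.count k : Int))).sum :=
        List.Perm.sum_eq (hperm.map _)
    _ = ((l.dedup.map (fun k => l.count k)).sum : Int) := by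
        rw [intCast_sum_map]
    _ = (l.length : Int) := by rw [List.sum_map_count_dedup_eq_length]

-- ===== VERDICT (by name: the statement is the Claim_ definition above) =====
theorem solve_spec : Claim_equal_solve := by
  intro n s _
  show solve n s = solve_alt n s
  unfold solve solve_alt
  rw [solveLoop_eq]
  have hctr : s.toList.foldl (fun d c => d.insert c (d.getD c 0 + 1)) PySem.Dict.empty
      = PySem.Dict.counter s.toList := PySem.Dict.foldl_insert_getD_add_one_eq_counter s.toList
  rw [hctr]
  show _ = ((PySem.Dict.counter s.toList).values.map (fun v => v + 1)).sum
  have hvals : (PySem.Dict.counter s.toList).values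
      = (PySem.Set.ofList s.toList : List Char).map (fun k => (s.toList.count k : Int)) := by
    show ((PySem.Dict.counter s.toList).items.map (·.2))
        = (PySem.Set.ofList s.toList : List Char).map (fun k => (s.toList.count k : Int))
    rw [PySem.Dict.items_counter, List.map_map]; rfl
  rw [hvals, List.map_map]
  have : ((PySem.Set.ofList s.toList : List Char).map
      ((fun v => v + 1) ∘ fun k => (s.toList.count k : Int))).sum
      = ((PySem.Set.ofList s.toList : List Char).map (fun k => (s.toList.count k : Int))).sum
        + ((PySem.Set.ofList s.toList : List Char).length : Int) := by
    induction (PySem.Set.ofList s.toList : List Char) with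
    | nil => simp
    | cons a t ih => simp [ih]; ring
  rw [this, sum_counts_ofList]
  have hemp : PySem.Set.update PySem.Set.empty s.toList = PySem.Set.ofList s.toList := by
    simp [PySem.Set.update, PySem.Set.ofList_eq_foldl, PySem.Set.empty]
  rw [hemp]
  simp [PySem.Set.empty]
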